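-- pv_equiv track=rewrite | github.com/TreyMillerDev/Assignment3 | helper_funcs.py | find_the_best_docs
-- ===== SOURCE A (Python) =====
-- def find_the_best_docs(tokens_dict):
--
--     #tokens dict is
--     #{term : { docid : (termfreq , [pos] ) } }
--     returnable = []
--     if len(tokens_dict.keys()) == 1: # sort by frequency if there is just one token
--         onlykey = list(tokens_dict.keys())[0] # makes a key of the only token
--         returnable = sorted(tokens_dict[onlykey], key=lambda x: tokens_dict[onlykey][x][0], reverse=True) #sorts in order of most frequent to least frequent
--     else:
--
--         new_tokens_dict = dict()
--         for token in tokens_dict.keys(): #for each key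
--             docids = sorted(tokens_dict[token], key=lambda x: tokens_dict[token][x][0], reverse=True) #sorts in order of most frequent to least frequent
--             new_tokens_dict[token] = docids #add the docids
--         concat_urls = []
--         for token in new_tokens_dict.keys(): #compiles all the docids into one list
--             concat_urls += new_tokens_dict[token]
--
--         #sorts based on most docid hits. if they are the same, then the frequency sorting from above takes precedent.
--         concat_urls = sorted(concat_urls, key=lambda x: concat_urls.count(x), reverse=True)
--         for docid in concat_urls:
--             if docid not in returnable:
--                 returnable.append(docid)
--
--     return returnable
-- ===== SOURCE B (Python) =====
-- def find_the_best_docs(tokens_dict):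
--     # One pass over the tokens: keep each token's freq-descending order, count
--     # docid hits in a dict and record first-appearance order; finish with a
--     # single stable sort of the deduplicated docids by hit count.
--     counts = {}
--     result = []
--     for inner in tokens_dict.values():
--         for docid in sorted(inner, key=lambda x: inner[x][0], reverse=True):
--             if docid not in counts:
--                 counts[docid] = 0
--                 result.append(docid)
--             counts[docid] += 1
--     return sorted(result, key=lambda d: counts[d], reverse=True)
-- ===== Notes on version B (the rewrite author's own statement) =====
-- stated objective: faster
-- what changed: B drops A's separate single-token branch and its concatenate / count-inside-sort-key / final-dedupe pipeline: one pass over the tokens keeps each token's freq-descending order while counting docid hits in a dict and recording first-appearance order, then a single stable sort of the already-deduplicated ids by hit count.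
import Mathlib
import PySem

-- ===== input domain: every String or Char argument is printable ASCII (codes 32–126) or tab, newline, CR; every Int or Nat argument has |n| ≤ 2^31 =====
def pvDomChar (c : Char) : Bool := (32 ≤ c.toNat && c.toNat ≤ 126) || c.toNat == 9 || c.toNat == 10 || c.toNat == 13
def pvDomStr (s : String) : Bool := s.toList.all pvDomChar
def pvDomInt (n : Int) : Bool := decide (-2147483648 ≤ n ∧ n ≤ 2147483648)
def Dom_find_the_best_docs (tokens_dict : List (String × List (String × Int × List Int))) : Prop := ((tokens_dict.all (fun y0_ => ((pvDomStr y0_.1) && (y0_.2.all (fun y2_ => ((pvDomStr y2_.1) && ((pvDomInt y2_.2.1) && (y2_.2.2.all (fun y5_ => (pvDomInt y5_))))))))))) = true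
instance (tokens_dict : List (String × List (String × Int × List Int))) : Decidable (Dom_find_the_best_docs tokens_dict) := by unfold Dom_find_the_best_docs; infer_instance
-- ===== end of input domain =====

-- B replaces A's concatenate / count-inside-sort-key / dedupe pipeline (and its separate
-- single-token branch) by one pass that counts docid hits in a dict while recording
-- first-appearance order, followed by a single stable sort by hit count (objective: faster; a timing run measured B faster).


-- ===== PORT A =====
-- sorted(inner, key=lambda x: inner[x][0], reverse=True): the per-token freq-descending
-- sort of the docids of one inner dict; this literal lambda occurs in BOTH Pythons.
def pvDocSort (inner : List (String × Int × List Int)) : List String :=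
  PySem.List.sorted (inner.map (·.1))
    (fun x => ((PySem.Dict.mk inner).getD x (0, [])).1) true

def find_the_best_docs (tokens_dict : List (String × List (String × Int × List Int))) : List String :=
  if (tokens_dict.map (·.1)).length == 1 then
    let onlykey := (tokens_dict.map (·.1)).headD ""
    pvDocSort ((PySem.Dict.mk tokens_dict).getD onlykey [])
  else
    let new_tokens_dict : List (String × List String) :=
      tokens_dict.foldl (fun acc p =>
        acc ++ [(p.1, pvDocSort ((PySem.Dict.mk tokens_dict).getD p.1 []))]) []
    let concat_urls := new_tokens_dict.foldl (fun acc p => acc ++ p.2) []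
    let concat_urls2 :=
      PySem.List.sorted concat_urls (fun x => (PySem.List.count concat_urls x : Int)) true
    concat_urls2.foldl (fun ret d => if ret.contains d then ret else ret ++ [d]) []

-- ===== PORT B =====
def find_the_best_docs_alt (tokens_dict : List (String × List (String × Int × List Int))) : List String :=
  let st :=
    tokens_dict.foldl (fun (st : PySem.Dict String Int × List String) p =>
      (pvDocSort p.2).foldl (fun st d =>
        let st := if st.1.contains d then st else (st.1.insert d 0, st.2 ++ [d])
        (st.1.insert d (st.1.getD d 0 + 1), st.2)) st)
      (PySem.Dict.empty, [])
  PySem.List.sorted st.2 (fun d => st.1.getD d 0) true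

-- ===== PRECONDITION & SPEC =====
-- Pre_ says the association lists really are the image of a Python dict of dicts: keys are
-- distinct at both levels (a list with duplicate keys does not arise from any Python dict,
-- so no input on which the Python A returns is excluded).
def Pre_find_the_best_docs (tokens_dict : List (String × List (String × Int × List Int))) : Prop :=
  (tokens_dict.map (·.1)).Nodup ∧ ∀ p ∈ tokens_dict, (p.2.map (·.1)).Nodup
instance (tokens_dict : List (String × List (String × Int × List Int))) : Decidable (Pre_find_the_best_docs tokens_dict) := by unfold Pre_find_the_best_docs; infer_instance

def pvWitness_find_the_best_docs : (List (String × List (String × Int × List Int))) :=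
  [("a", [("d1", 2, [1]), ("d2", 1, [2])]), ("b", [("d2", 3, [0])])]

def Spec_find_the_best_docs (tokens_dict : List (String × List (String × Int × List Int))) (out : List String) : Prop := out = find_the_best_docs_alt tokens_dict
instance (tokens_dict : List (String × List (String × Int × List Int))) (out : List String) : Decidable (Spec_find_the_best_docs tokens_dict out) := by unfold Spec_find_the_best_docs; infer_instance

-- ===== CLAIM (what is proved, stated in full; the proofs are below) =====
def Claim_equal_find_the_best_docs : Prop := ∀ (tokens_dict : List (String × List (String × Int × List Int))), Dom_find_the_best_docs tokens_dict → Pre_find_the_best_docs tokens_dict → Spec_find_the_best_docs tokens_dict (find_the_best_docs tokens_dict)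

-- ===== LEMMAS AND PROOFS =====

-- insertBy splits its list: x lands between a prefix it does not go before and a suffix
-- whose head it does go before.
theorem pv_insertBy_split {α : Type} (before : α → α → Bool) (x : α) (ys : List α) :
    ∃ pre suf, ys = pre ++ suf ∧
      PySem.List.insertBy before x ys = pre ++ x :: suf ∧
      (∀ y ∈ pre, before x y = false) ∧
      (suf = [] ∨ ∃ z t, suf = z :: t ∧ before x z = true) := by
  induction ys with
  | nil => exact ⟨[], [], rfl, rfl, by simp, Or.inl rfl⟩
  | cons y ys ih =>
    by_cases h : before x y = true
    · exact ⟨[], y :: ys, rfl, by simp [PySem.List.insertBy, h], by simp, Or.inr ⟨y, ys, rfl, h⟩⟩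
    · obtain ⟨pre, suf, hys, hins, hpre, hsuf⟩ := ih
      refine ⟨y :: pre, suf, by simp [hys], ?_, ?_, hsuf⟩
      · simp [PySem.List.insertBy, h, hins]
      · intro z hz
        rcases List.mem_cons.mp hz with rfl | hz
        · simpa using h
        · exact hpre _ hz

-- inserting x into P ++ F when x goes before everything in F and nothing in P
theorem pv_insertBy_middle {α : Type} (before : α → α → Bool) (x : α) (P F : List α)
    (hP : ∀ y ∈ P, before x y = false) (hF : ∀ y ∈ F, before x y = true) :
    PySem.List.insertBy before x (P ++ F) = P ++ x :: F := by
  induction P with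
  | nil =>
    cases F with
    | nil => rfl
    | cons z t => simp [PySem.List.insertBy, hF z (by simp)]
  | cons y P ih =>
    have hy : before x y = false := hP y (by simp)
    simp only [List.cons_append, PySem.List.insertBy, hy]
    simp [ih (fun y hy => hP y (by simp [hy]))]

-- first-occurrence dedup ignores a duplicate inserted by a stable sort step
theorem pv_ofList_insertBy_mem (k : String → Int) (x : String) (ys : List String)
    (hs : ys.Pairwise (fun a b => k b ≤ k a)) (hx : x ∈ ys) :
    PySem.Set.ofList (PySem.List.insertBy (fun a b => decide (k b < k a)) x ys)
      = PySem.Set.ofList ys := by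
  obtain ⟨pre, suf, hys, hins, hpre, hsuf⟩ :=
    pv_insertBy_split (fun a b => decide (k b < k a)) x ys
  subst hys
  -- x lies in pre: everything in suf has key < k x while x's own key is k x
  have hxpre : x ∈ pre := by
    rcases (by simpa using hx : x ∈ pre ∨ x ∈ suf) with h | h
    · exact h
    · exfalso
      rcases hsuf with rfl | ⟨z, t, rfl, hz⟩
      · simp at h
      · have hzx : k z < k x := by simpa using hz
        have hzt := (List.pairwise_append.mp hs).2.1
        rcases List.mem_cons.mp h with rfl | h
        · omega
        · have := (List.pairwise_cons.mp hzt).1 x h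
          omega
  rw [hins, PySem.Set.ofList_append, PySem.Set.ofList_append,
    PySem.Set.update_cons, PySem.Set.add_of_mem (by simpa [PySem.Set.mem_ofList] using hxpre)]

-- first-occurrence dedup commutes with one stable-sort insertion of a fresh element
theorem pv_ofList_insertBy_not_mem (k : String → Int) (x : String) (ys : List String)
    (hs : ys.Pairwise (fun a b => k b ≤ k a)) (hx : x ∉ ys) :
    PySem.Set.ofList (PySem.List.insertBy (fun a b => decide (k b < k a)) x ys)
      = PySem.List.insertBy (fun a b => decide (k b < k a)) x (PySem.Set.ofList ys) := by
  obtain ⟨pre, suf, hys, hins, hpre, hsuf⟩ :=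
    pv_insertBy_split (fun a b => decide (k b < k a)) x ys
  subst hys
  have hxp : x ∉ pre := fun h => hx (by simp [h])
  have hxs : x ∉ suf := fun h => hx (by simp [h])
  -- every element of suf is strictly below x's key
  have hsufall : ∀ y ∈ suf, (k y < k x) := by
    rcases hsuf with rfl | ⟨z, t, rfl, hz⟩
    · simp
    · have hzx : k z < k x := by simpa using hz
      intro y hy
      rcases List.mem_cons.mp hy with rfl | hy
      · exact hzx
      · have := (List.pairwise_cons.mp (List.pairwise_append.mp hs).2.1).1 y hy
        omega
  rw [hins, PySem.Set.ofList_append, PySem.Set.ofList_append,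
    PySem.Set.update_cons, PySem.Set.add_of_not_mem (by simpa [PySem.Set.mem_ofList] using hxp),
    PySem.Set.update_eq_append_filter, PySem.Set.update_eq_append_filter]
  have hfilt :
      (PySem.Set.ofList suf).filter (fun y => !(PySem.Set.contains (PySem.Set.ofList pre ++ [x]) y))
        = (PySem.Set.ofList suf).filter (fun y => !(PySem.Set.contains (PySem.Set.ofList pre) y)) := by
    apply List.filter_congr
    intro y hy
    have hyx : y ≠ x := by
      intro h; exact hxs (by simpa [h] using (PySem.Set.mem_ofList suf y).mp hy)
    simp [PySem.Set.contains_eq_listContains, hyx]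
  rw [hfilt, pv_insertBy_middle]
  · simp
  · intro y hy
    exact hpre y (by simpa [PySem.Set.mem_ofList] using hy)
  · intro y hy
    have hy' : y ∈ suf := by
      have := List.mem_of_mem_filter hy
      simpa [PySem.Set.mem_ofList] using this
    simpa using hsufall y hy'

-- one stable-sort insertion step, stated on sorted itself
theorem pv_sorted_append_singleton (l : List String) (x : String) (k : String → Int) :
    PySem.List.sorted (l ++ [x]) k true
      = PySem.List.insertBy (fun a b => decide (k b < k a)) x (PySem.List.sorted l k true) := by
  rw [PySem.List.sorted_rev_eq_foldl_insertBy, PySem.List.sorted_rev_eq_foldl_insertBy,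
    List.foldl_append]
  rfl

-- MAIN LEMMA: first-occurrence dedup commutes with Python's stable reverse sort
-- (duplicates of an element always carry the same key).
theorem pv_ofList_sorted_comm (l : List String) (k : String → Int) :
    PySem.Set.ofList (PySem.List.sorted l k true)
      = PySem.List.sorted (PySem.Set.ofList l) k true := by
  induction l using List.reverseRecOn with
  | nil => rfl
  | append_singleton l x ih =>
    rw [pv_sorted_append_singleton, PySem.Set.ofList_append_singleton]
    by_cases hx : x ∈ l
    · rw [pv_ofList_insertBy_mem k x _ (PySem.List.sorted_pairwise_rev l k)
        (by simpa [PySem.List.mem_sorted] using hx), ih,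
        PySem.Set.add_of_mem (by simpa [PySem.Set.mem_ofList] using hx)]
    · rw [pv_ofList_insertBy_not_mem k x _ (PySem.List.sorted_pairwise_rev l k)
        (by simpa [PySem.List.mem_sorted] using hx), ih,
        PySem.Set.add_of_not_mem (by simpa [PySem.Set.mem_ofList] using hx),
        pv_sorted_append_singleton]

-- the concatenation both programs effectively sort
def pvConcat (tokens_dict : List (String × List (String × Int × List Int))) : List String :=
  tokens_dict.flatMap (fun p => pvDocSort p.2)

theorem pv_A_concat (td : List (String × List (String × Int × List Int)))
    (hnd : (td.map (·.1)).Nodup) :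
    (td.foldl (fun acc p =>
        acc ++ [(p.1, pvDocSort ((PySem.Dict.mk td).getD p.1 []))]) []).foldl
      (fun acc p => acc ++ p.2) [] = pvConcat td := by
  rw [PySem.List.foldl_append_singleton_eq_map, List.nil_append,
    PySem.List.foldl_append_eq_flatMap, List.nil_append, List.flatMap_map]
  show List.flatMap _ td = List.flatMap _ td
  rw [List.flatMap, List.flatMap,
    List.map_congr_left (fun p hp => by
      rw [PySem.Dict.getD_of_mem_items (d := PySem.Dict.mk td) (by simpa using hp) hnd])]

-- B's per-docid update step (the body of Source B's inner loop)
def pvStep (st : PySem.Dict String Int × List String) (d : String) :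
    PySem.Dict String Int × List String :=
  let st := if st.1.contains d then st else (st.1.insert d 0, st.2 ++ [d])
  (st.1.insert d (st.1.getD d 0 + 1), st.2)

theorem pv_B_alt_eq (td : List (String × List (String × Int × List Int))) :
    find_the_best_docs_alt td =
      (fun st => PySem.List.sorted st.2 (fun d => st.1.getD d 0) true)
        (td.foldl (fun st p => (pvDocSort p.2).foldl pvStep st) (PySem.Dict.empty, [])) := rfl

-- B's inner loop over one docid list, with counts/result membership in sync
theorem pv_B_inner (xs : List String) (c : PySem.Dict String Int) (r : List String)
    (hcr : ∀ d, c.contains d = r.contains d) :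
    (xs.foldl pvStep (c, r)).2 = PySem.Set.update r xs
    ∧ (∀ d, (xs.foldl pvStep (c, r)).1.getD d 0
          = c.getD d 0 + (PySem.List.count xs d : Int))
    ∧ (∀ d, (xs.foldl pvStep (c, r)).1.contains d = (xs.foldl pvStep (c, r)).2.contains d) := by
  induction xs generalizing c r with
  | nil =>
    refine ⟨rfl, fun d => by simp [PySem.List.count_eq], fun d => hcr d⟩
  | cons d0 xs ih =>
    by_cases h : c.contains d0 = true
    · have hr : r.contains d0 = true := (hcr d0).symm.trans h
      have hstep : pvStep (c, r) d0 = (c.insert d0 (c.getD d0 0 + 1), r) := by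
        simp [pvStep, h]
      have hcr' : ∀ d, (c.insert d0 (c.getD d0 0 + 1)).contains d = r.contains d := by
        intro d
        by_cases hd : d = d0
        · subst hd
          rw [PySem.Dict.contains_insert, ← hcr d]
          simp [h]
        · rw [PySem.Dict.contains_insert, hcr d]
          simp [hd]
      obtain ⟨ih1, ih2, ih3⟩ := ih (c.insert d0 (c.getD d0 0 + 1)) r hcr'
      refine ⟨?_, ?_, ?_⟩
      · rw [List.foldl_cons, hstep, ih1, PySem.Set.update_cons,
          PySem.Set.add_of_mem (by simpa [List.contains_iff_mem] using hr)]
      · intro d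
        rw [List.foldl_cons, hstep, ih2 d, PySem.Dict.getD_insert]
        by_cases hd : d = d0
        · subst hd
          simp [PySem.List.count_eq]
          ring
        · simp [hd, PySem.List.count_eq, Ne.symm hd]
      · intro d
        rw [List.foldl_cons, hstep]
        exact ih3 d
    · have hb : c.contains d0 = false := by simpa using h
      have hr : r.contains d0 = false := (hcr d0).symm.trans hb
      have hstep : pvStep (c, r) d0 = (c.insert d0 (0 + 1), r ++ [d0]) := by
        simp [pvStep, hb, PySem.Dict.getD_insert_self, PySem.Dict.insert_insert_self]
      have hcr' : ∀ d, (c.insert d0 (0 + 1)).contains d = (r ++ [d0]).contains d := by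
        intro d
        by_cases hd : d = d0
        · subst hd
          rw [PySem.Dict.contains_insert]
          simp
        · rw [PySem.Dict.contains_insert, hcr d]
          simp [hd]
      obtain ⟨ih1, ih2, ih3⟩ := ih (c.insert d0 (0 + 1)) (r ++ [d0]) hcr'
      refine ⟨?_, ?_, ?_⟩
      · rw [List.foldl_cons, hstep, ih1, PySem.Set.update_cons,
          PySem.Set.add_of_not_mem (by simpa [List.contains_iff_mem] using hr)]
      · intro d
        rw [List.foldl_cons, hstep, ih2 d, PySem.Dict.getD_insert]
        by_cases hd : d = d0
        · subst hd
          rw [PySem.Dict.getD_of_not_contains c 0 hb]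
          simp [PySem.List.count_eq]
          ring
        · simp [hd, PySem.List.count_eq, Ne.symm hd]
      · intro d
        rw [List.foldl_cons, hstep]
        exact ih3 d

-- B's outer loop: result is the deduped concatenation, counts are its multiplicities
theorem pv_B_top (td : List (String × List (String × Int × List Int)))
    (c : PySem.Dict String Int) (r : List String)
    (hcr : ∀ d, c.contains d = r.contains d) :
    (td.foldl (fun st p => (pvDocSort p.2).foldl pvStep st) (c, r)).2
        = PySem.Set.update r (pvConcat td)
    ∧ (∀ d, (td.foldl (fun st p => (pvDocSort p.2).foldl pvStep st) (c, r)).1.getD d 0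
          = c.getD d 0 + (PySem.List.count (pvConcat td) d : Int))
    ∧ (∀ d, (td.foldl (fun st p => (pvDocSort p.2).foldl pvStep st) (c, r)).1.contains d
          = (td.foldl (fun st p => (pvDocSort p.2).foldl pvStep st) (c, r)).2.contains d) := by
  induction td generalizing c r with
  | nil =>
    refine ⟨rfl, fun d => by simp [pvConcat, PySem.List.count_eq], fun d => hcr d⟩
  | cons p td ih =>
    obtain ⟨h1, h2, h3⟩ := pv_B_inner (pvDocSort p.2) c r hcr
    have hcr2 : ∀ d, ((pvDocSort p.2).foldl pvStep (c, r)).1.contains d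
        = ((pvDocSort p.2).foldl pvStep (c, r)).2.contains d := h3
    obtain ⟨ih1, ih2, ih3⟩ := ih ((pvDocSort p.2).foldl pvStep (c, r)).1
      ((pvDocSort p.2).foldl pvStep (c, r)).2 hcr2
    have hconcat : pvConcat (p :: td) = pvDocSort p.2 ++ pvConcat td := by
      simp [pvConcat]
    refine ⟨?_, ?_, ?_⟩
    · rw [List.foldl_cons, ih1, h1, hconcat, PySem.Set.update_append]
    · intro d
      rw [List.foldl_cons, ih2 d, h2 d, hconcat]
      simp only [PySem.List.count_eq, List.count_append]
      push_cast
      ring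
    · intro d
      rw [List.foldl_cons]
      exact ih3 d

-- B in closed form: one stable count-sort of the deduped concatenation
theorem pv_B_closed (td : List (String × List (String × Int × List Int))) :
    find_the_best_docs_alt td
      = PySem.List.sorted (PySem.Set.ofList (pvConcat td))
          (fun x => (PySem.List.count (pvConcat td) x : Int)) true := by
  rw [pv_B_alt_eq]
  obtain ⟨h1, h2, _⟩ := pv_B_top td PySem.Dict.empty []
    (fun d => by simp [PySem.Dict.contains_empty])
  simp only
  rw [h1, PySem.Set.update_nil_left]
  congr 1
  funext d
  rw [h2 d, PySem.Dict.getD_empty]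
  ring

-- ===== VERDICT (by name: the statement is the Claim_ definition above) =====
theorem find_the_best_docs_spec : Claim_equal_find_the_best_docs := by
  intro td _ hpre
  unfold Spec_find_the_best_docs
  obtain ⟨hnd, hinner⟩ := hpre
  unfold find_the_best_docs
  by_cases hlen : (td.map (·.1)).length == 1
  · -- single-token branch: the concatenation is one Nodup sorted list, all counts are 1
    simp only [hlen, if_true]
    obtain ⟨p, rfl⟩ : ∃ p, td = [p] := by
      cases td with
      | nil => simp at hlen
      | cons p t =>
        cases t with
        | nil => exact ⟨p, rfl⟩
        | cons q t => simp at hlen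
    have hget : (PySem.Dict.mk [p]).getD p.1 [] = p.2 :=
      PySem.Dict.getD_of_mem_items (d := PySem.Dict.mk [p]) (by simp) (by simp) []
    have hC : pvConcat [p] = pvDocSort p.2 := by simp [pvConcat]
    have hnodup : (pvDocSort p.2).Nodup := by
      unfold pvDocSort
      exact (PySem.List.sorted_perm (p.2.map (·.1))
        (fun x => ((PySem.Dict.mk p.2).getD x (0, [])).1) true).nodup_iff.mpr
        (hinner p (by simp))
    rw [pv_B_closed, hC, PySem.Set.ofList_eq_self_of_nodup _ hnodup,
      PySem.List.sorted_rev_eq_self_of_pairwise _ _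
        (List.pairwise_of_forall_mem_list (fun a ha b hb => by
          rw [PySem.List.count_eq, PySem.List.count_eq,
            List.count_eq_one_of_mem hnodup ha, List.count_eq_one_of_mem hnodup hb]))]
    simp [hget]
  · -- general branch: dedup of the count-sorted concatenation vs count-sort of the dedup
    simp only [hlen, if_false, Bool.false_eq_true]
    rw [show (fun (ret : List String) d => if ret.contains d then ret else ret ++ [d])
        = fun s x => PySem.Set.add s x from rfl,
      ← PySem.Set.ofList_eq_foldl, pv_A_concat td hnd, pv_B_closed,
      pv_ofList_sorted_comm]
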